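-- pv_equiv track=rewrite | github.com/Transipedia/RiboKastIndex | tools/kmers_index/functionsCountingKmer_min_3_phase.py | phasedKmerCounting
-- ===== SOURCE A (Python) =====
-- from collections import defaultdict
--
-- def phasedKmerCounting(sequences, kmerSize, sublistSSR, forced_phase=None):
--     """
--     Count phased k-mers.
--     - If forced_phase is None: use original bucket logic based on min phase:
--         chosenPhase in {min_phase, min_phase+3, min_phase+6} depending on SSR phase.
--     - If forced_phase is set: impose that chosenPhase for all SSRs (no buckets).
--     Extract exactly ONE k-mer per matching read: seq[phaseCut : phaseCut + kmerSize]
--     when 0 <= phaseCut and phaseCut + kmerSize <= len(seq).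
--     """
--     if not sublistSSR:
--         return {}
--
--     dictKmer = defaultdict(int)
--
--     if forced_phase is None:
--         # Original dynamic buckets (min, min+3, min+6)
--         min_phase = min(sub[2] for sub in sublistSSR)
--         phase1 = min_phase
--         phase2 = phase1 + 3
--         phase3 = phase2 + 3
--
--     for seq in sequences:
--         L = len(seq)
--         if L < kmerSize:
--             continue
--
--         for ssr_id, length, phase in sublistSSR:
--             if int(length) != L:
--                 continue
--
--             if forced_phase is None:
--                 # Bucket assignment
--                 if phase1 <= phase < phase2:
--                     chosenPhase = phase1
--                 elif phase2 <= phase < phase3: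
--                     chosenPhase = phase2
--                 elif phase >= phase3:
--                     chosenPhase = phase3
--                 else:
--                     # This shouldn't happen if buckets cover all >= min_phase
--                     continue
--             else:
--                 # Imposed phase: exactly what the user asked for
--                 chosenPhase = forced_phase
--
--             phaseCut = int(phase) - chosenPhase
--             # We only accept non-negative cut and the slice must fit entirely
--             if phaseCut < 0:
--                 continue
--             end_pos = phaseCut + kmerSize
--             if end_pos > L:
--                 continue
--
--             kmer = seq[phaseCut:end_pos]
--             dictKmer[kmer] += 1
--
--     return dict(sorted(dictKmer.items()))
-- ===== SOURCE B (Python) =====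
-- from collections import defaultdict
--
-- def phasedKmerCounting(sequences, kmerSize, sublistSSR, forced_phase=None):
--     if not sublistSSR:
--         return {}
--     # index the reads by length once
--     seqByLen = defaultdict(list)
--     for seq in sequences:
--         seqByLen[len(seq)].append(seq)
--     if forced_phase is None:
--         min_phase = min(sub[2] for sub in sublistSSR)
--     counts = defaultdict(int)
--     for ssr_id, length, phase in sublistSSR:
--         if forced_phase is None:
--             # arithmetic form of the three buckets min, min+3, min+6
--             chosenPhase = min_phase + 3 * min((phase - min_phase) // 3, 2)
--         else:
--             chosenPhase = forced_phase
--         phaseCut = phase - chosenPhase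
--         if phaseCut < 0:
--             continue
--         end_pos = phaseCut + kmerSize
--         for seq in seqByLen.get(length, ()):
--             if end_pos <= len(seq):
--                 counts[seq[phaseCut:end_pos]] += 1
--     return dict(sorted(counts.items()))
-- ===== Notes on version B (the rewrite author's own statement) =====
-- stated objective: alternative
-- what changed: B inverts A's reads-by-SSRs nested scan: it builds a length-indexed bucket of the reads once, hoists the per-SSR phase computation (replacing the three-way bucket if-chain by the closed form min_phase + 3*min((phase-min_phase)//3, 2)) out of the read loop, and iterates SSRs outermost over only the matching-length reads.
import Mathlib
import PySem

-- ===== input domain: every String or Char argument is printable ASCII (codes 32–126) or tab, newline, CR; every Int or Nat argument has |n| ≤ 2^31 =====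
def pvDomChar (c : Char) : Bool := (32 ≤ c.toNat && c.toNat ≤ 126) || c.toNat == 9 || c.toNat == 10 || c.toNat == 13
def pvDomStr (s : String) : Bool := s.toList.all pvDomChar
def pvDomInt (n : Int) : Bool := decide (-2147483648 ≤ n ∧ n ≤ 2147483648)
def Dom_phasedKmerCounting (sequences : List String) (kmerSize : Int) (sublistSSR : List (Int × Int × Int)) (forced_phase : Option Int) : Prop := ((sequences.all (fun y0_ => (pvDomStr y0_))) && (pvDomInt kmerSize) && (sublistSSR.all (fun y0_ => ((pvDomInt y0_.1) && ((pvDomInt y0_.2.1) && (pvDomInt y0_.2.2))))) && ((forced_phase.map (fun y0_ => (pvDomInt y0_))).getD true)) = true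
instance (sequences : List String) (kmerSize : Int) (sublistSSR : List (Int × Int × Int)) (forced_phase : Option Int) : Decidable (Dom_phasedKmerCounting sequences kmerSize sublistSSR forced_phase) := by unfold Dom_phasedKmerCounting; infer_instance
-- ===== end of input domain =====

-- B replaces A's reads×SSRs nested scan by a length-indexed bucket of the reads and one pass
-- over the SSRs with the phase arithmetic hoisted (objective: alternative decomposition).

-- ===== PORT A =====
-- literal port of A: nested loop reads × SSRs, defaultdict(int) increment, dict(sorted(...))
def phasedKmerCounting (sequences : List String) (kmerSize : Int) (sublistSSR : List (Int × Int × Int)) (forced_phase : Option Int) : List (String × Int) :=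
  if sublistSSR = [] then []
  else
    -- min(sub[2] for sub in sublistSSR); the list is nonempty here so min? is some (getD never fires)
    let min_phase : Int := (PySem.List.min? (sublistSSR.map (fun sub => sub.2.2)) (fun x => x)).getD 0
    let phase1 := min_phase
    let phase2 := phase1 + 3
    let phase3 := phase2 + 3
    let dictKmer : PySem.Dict String Int :=
      sequences.foldl (fun d seq =>
        let L : Int := PySem.Str.len seq
        if L < kmerSize then d
        else
          sublistSSR.foldl (fun d ssr =>
            if ssr.2.1 ≠ L then d
            else
              let chosen? : Option Int :=
                match forced_phase with
                | none =>
                  if phase1 ≤ ssr.2.2 ∧ ssr.2.2 < phase2 then some phase1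
                  else if phase2 ≤ ssr.2.2 ∧ ssr.2.2 < phase3 then some phase2
                  else if ssr.2.2 ≥ phase3 then some phase3
                  else none
                | some fp => some fp
              match chosen? with
              | none => d    -- the "shouldn't happen" continue
              | some chosenPhase =>
                let phaseCut := ssr.2.2 - chosenPhase
                if phaseCut < 0 then d
                else
                  let end_pos := phaseCut + kmerSize
                  if end_pos > L then d
                  else
                    d.modify (PySem.Str.slice seq (some phaseCut) (some end_pos)) 0 (· + 1)) d)
        PySem.Dict.empty
    PySem.List.sorted2 dictKmer.items Prod.fst Prod.snd

-- ===== PORT B =====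
-- literal port of Source B: bucket the reads by length once, then one pass over the SSRs
def phasedKmerCounting_alt (sequences : List String) (kmerSize : Int) (sublistSSR : List (Int × Int × Int)) (forced_phase : Option Int) : List (String × Int) :=
  if sublistSSR = [] then []
  else
    -- seqByLen: defaultdict(list) indexed by len(seq)
    let seqByLen : PySem.Dict Int (List String) :=
      sequences.foldl (fun d seq => d.modify (PySem.Str.len seq) [] (· ++ [seq])) PySem.Dict.empty
    -- min(sub[2] for sub in sublistSSR) (only used when forced_phase is none); nonempty list
    let min_phase : Int := (PySem.List.min? (sublistSSR.map (fun sub => sub.2.2)) (fun x => x)).getD 0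
    let counts : PySem.Dict String Int :=
      sublistSSR.foldl (fun d ssr =>
        let chosenPhase : Int :=
          match forced_phase with
          | none => min_phase + 3 * min (PySem.Int.floordiv (ssr.2.2 - min_phase) 3) 2
          | some fp => fp
        let phaseCut := ssr.2.2 - chosenPhase
        if phaseCut < 0 then d
        else
          let end_pos := phaseCut + kmerSize
          (seqByLen.getD ssr.2.1 []).foldl (fun d seq =>
            if end_pos ≤ PySem.Str.len seq then
              d.modify (PySem.Str.slice seq (some phaseCut) (some end_pos)) 0 (· + 1)
            else d) d)
        PySem.Dict.empty
    PySem.List.sorted2 counts.items Prod.fst Prod.snd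

-- ===== PRECONDITION & SPEC =====
def Spec_phasedKmerCounting (sequences : List String) (kmerSize : Int) (sublistSSR : List (Int × Int × Int)) (forced_phase : Option Int) (out : List (String × Int)) : Prop := out = phasedKmerCounting_alt sequences kmerSize sublistSSR forced_phase
instance (sequences : List String) (kmerSize : Int) (sublistSSR : List (Int × Int × Int)) (forced_phase : Option Int) (out : List (String × Int)) : Decidable (Spec_phasedKmerCounting sequences kmerSize sublistSSR forced_phase out) := by unfold Spec_phasedKmerCounting; infer_instance

-- ===== CLAIM (what is proved, stated in full; the proofs are below) =====
def Claim_equal_phasedKmerCounting : Prop := ∀ (sequences : List String) (kmerSize : Int) (sublistSSR : List (Int × Int × Int)) (forced_phase : Option Int), Dom_phasedKmerCounting sequences kmerSize sublistSSR forced_phase → Spec_phasedKmerCounting sequences kmerSize sublistSSR forced_phase (phasedKmerCounting sequences kmerSize sublistSSR forced_phase)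

-- ===== LEMMAS AND PROOFS =====

-- the defaultdict(int) increment step shared by both counting loops
def pvStep (d : PySem.Dict String Int) (k : String) : PySem.Dict String Int := d.modify k 0 (· + 1)

-- A's per-(read, SSR) decision: the Option of the one k-mer the pair contributes
def pvFA (kmerSize phase1 : Int) (forced_phase : Option Int) (seq : String) (ssr : Int × Int × Int) : Option String :=
  if PySem.Str.len seq < kmerSize then none
  else if ssr.2.1 ≠ PySem.Str.len seq then none
  else
    match (match forced_phase with
      | none =>
        if phase1 ≤ ssr.2.2 ∧ ssr.2.2 < phase1 + 3 then some phase1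
        else if phase1 + 3 ≤ ssr.2.2 ∧ ssr.2.2 < phase1 + 3 + 3 then some (phase1 + 3)
        else if ssr.2.2 ≥ phase1 + 3 + 3 then some (phase1 + 3 + 3)
        else none
      | some fp => some fp) with
    | none => none
    | some c =>
      if ssr.2.2 - c < 0 then none
      else if ssr.2.2 - c + kmerSize > PySem.Str.len seq then none
      else some (PySem.Str.slice seq (some (ssr.2.2 - c)) (some (ssr.2.2 - c + kmerSize)))

-- B's per-SSR phase cut (none = the `continue`)
def pvFB (min_phase : Int) (forced_phase : Option Int) (ssr : Int × Int × Int) : Option Int :=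
  let chosenPhase : Int :=
    match forced_phase with
    | none => min_phase + 3 * min (PySem.Int.floordiv (ssr.2.2 - min_phase) 3) 2
    | some fp => fp
  if ssr.2.2 - chosenPhase < 0 then none else some (ssr.2.2 - chosenPhase)

-- B's per-read slice for a fixed cut
def pvHB (kmerSize cut : Int) (seq : String) : Option String :=
  if cut + kmerSize ≤ PySem.Str.len seq then some (PySem.Str.slice seq (some cut) (some (cut + kmerSize))) else none

-- B's per-(SSR, read) contribution
def pvGB (kmerSize min_phase : Int) (forced_phase : Option Int) (ssr : Int × Int × Int) (seq : String) : Option String :=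
  (pvFB min_phase forced_phase ssr).bind (fun cut =>
    if PySem.Str.len seq = ssr.2.1 then pvHB kmerSize cut seq else none)

-- a fold whose body increments at (f x) when some, else skips, is a counter fold over the filterMap
theorem pv_foldl_opt {α : Type} (body : PySem.Dict String Int → α → PySem.Dict String Int)
    (f : α → Option String)
    (h : ∀ d x, body d x = match f x with | some k => pvStep d k | none => d) :
    ∀ (l : List α) (d : PySem.Dict String Int), l.foldl body d = (l.filterMap f).foldl pvStep d := by
  intro l
  induction l with
  | nil => intro d; rfl
  | cons x t ih =>
    intro d
    simp only [List.foldl_cons, List.filterMap_cons, h d x]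
    cases hf : f x with
    | none => simp [ih]
    | some k => simp [ih]

-- comparing only against members of the existing list, insertBy depends on the comparator there
theorem pv_insertBy_congr {α : Type} (f g : α → α → Bool) (x : α) :
    ∀ (ys : List α), (∀ y ∈ ys, f x y = g x y) →
      PySem.List.insertBy f x ys = PySem.List.insertBy g x ys := by
  intro ys
  induction ys with
  | nil => intro _; rfl
  | cons y t ih =>
    intro h
    simp only [PySem.List.insertBy, h y (by simp)]
    by_cases hb : g x y = true
    · simp [hb]
    · simp [hb, ih (fun z hz => h z (by simp [hz]))]

theorem pv_foldl_insertBy_congr {α : Type} (f g : α → α → Bool) :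
    ∀ (xs acc : List α),
      (∀ a ∈ xs, ∀ b, (b ∈ acc ∨ b ∈ xs) → f a b = g a b) →
      xs.foldl (fun acc x => PySem.List.insertBy f x acc) acc
        = xs.foldl (fun acc x => PySem.List.insertBy g x acc) acc := by
  intro xs
  induction xs with
  | nil => intro _ _; rfl
  | cons x t ih =>
    intro acc h
    simp only [List.foldl_cons]
    rw [pv_insertBy_congr f g x acc (fun y hy => h x (by simp) y (Or.inl hy))]
    apply ih
    intro a ha b hb
    apply h a (by simp [ha])
    rcases hb with hb | hb
    · rcases (PySem.List.mem_insertBy g x b acc).mp hb with hb | hb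
      · subst hb; exact Or.inr (by simp)
      · exact Or.inl hb
    · exact Or.inr (by simp [hb])

-- with pairwise-distinct first components, the tuple sort is the sort on the first component
theorem pv_sorted2_eq_sorted (xs : List (String × Int)) (h : (xs.map Prod.fst).Nodup) :
    PySem.List.sorted2 xs Prod.fst Prod.snd = PySem.List.sorted xs Prod.fst := by
  rw [PySem.List.sorted_eq_foldl_insertBy]
  show xs.foldl (fun acc x => PySem.List.insertBy
      (fun a b => decide (a.1 < b.1) || (!decide (b.1 < a.1) && decide (a.2 < b.2))) x acc) []
    = xs.foldl (fun acc x => PySem.List.insertBy (fun a b => decide (a.1 < b.1)) x acc) []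
  apply pv_foldl_insertBy_congr
  intro a ha b hb
  have hb' : b ∈ xs := by
    cases hb with
    | inl hb => simp at hb
    | inr hb => exact hb
  by_cases hab : a.1 = b.1
  · have : a = b := List.inj_on_of_nodup_map h ha hb' hab
    subst this
    simp
  · rcases lt_or_gt_of_ne hab with hlt | hgt
    · rw [decide_eq_true hlt]
      simp
    · rw [decide_eq_false (not_lt.mpr (le_of_lt hgt)), decide_eq_true hgt]
      simp

-- sorting by the (pairwise distinct) first component is invariant under permutation
theorem pv_sorted_fst_perm (l₁ l₂ : List (String × Int)) (hp : l₁.Perm l₂)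
    (h : (l₂.map Prod.fst).Nodup) :
    PySem.List.sorted l₁ Prod.fst = PySem.List.sorted l₂ Prod.fst := by
  apply PySem.List.sorted_eq_of_perm_of_pairwise_lt
  · exact (PySem.List.sorted_perm l₂ Prod.fst false).trans hp.symm
  · have hnd : ((PySem.List.sorted l₂ Prod.fst).map Prod.fst).Nodup := by
      have := (PySem.List.sorted_perm l₂ Prod.fst false).map Prod.fst
      exact this.nodup_iff.mpr h
    have hle := PySem.List.sorted_pairwise l₂ Prod.fst
    have hne : (PySem.List.sorted l₂ Prod.fst).Pairwise (fun a b => a.1 ≠ b.1) :=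
      List.pairwise_map.mp hnd
    exact (hle.and hne).imp (fun h => lt_of_le_of_ne h.1 h.2)

-- the sorted items of a counter depend only on the multiset of counted keys
theorem pv_counter_sorted (kA kB : List String) (hp : kA.Perm kB) :
    PySem.List.sorted2 (PySem.Dict.counter kA).items Prod.fst Prod.snd
      = PySem.List.sorted2 (PySem.Dict.counter kB).items Prod.fst Prod.snd := by
  have hfst : ∀ (l : List String),
      ((PySem.Dict.counter l).items.map Prod.fst) = PySem.Set.ofList l := by
    intro l
    rw [PySem.Dict.items_counter, List.map_map]
    simp [Function.comp_def]
  have hndA : ((PySem.Dict.counter kA).items.map Prod.fst).Nodup := by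
    rw [hfst]; exact PySem.Set.nodup_ofList kA
  have hndB : ((PySem.Dict.counter kB).items.map Prod.fst).Nodup := by
    rw [hfst]; exact PySem.Set.nodup_ofList kB
  have hitems : (PySem.Dict.counter kA).items.Perm (PySem.Dict.counter kB).items := by
    rw [PySem.Dict.items_counter, PySem.Dict.items_counter]
    have hsets : (PySem.Set.ofList kA).Perm (PySem.Set.ofList kB) := by
      rw [List.perm_ext_iff_of_nodup (PySem.Set.nodup_ofList kA) (PySem.Set.nodup_ofList kB)]
      intro a
      rw [PySem.Set.mem_ofList, PySem.Set.mem_ofList, hp.mem_iff]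
    have hfun : (fun k => (k, (List.count k kA : Int))) = (fun k => (k, (List.count k kB : Int))) := by
      funext k; rw [hp.count_eq]
    rw [hfun]
    exact hsets.map _
  rw [pv_sorted2_eq_sorted _ hndA, pv_sorted2_eq_sorted _ hndB]
  exact pv_sorted_fst_perm _ _ hitems hndB

-- the guard chains after the chosen phase agree between A's shape and B's shape
theorem pv_core (kS c L2 phase : Int) (seq : String) :
    (if PySem.Str.len seq < kS then none
     else if L2 ≠ PySem.Str.len seq then none
     else if phase - c < 0 then none
     else if phase - c + kS > PySem.Str.len seq then none
     else some (PySem.Str.slice seq (some (phase - c)) (some (phase - c + kS))))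
  = (if phase - c < 0 then none else some (phase - c)).bind
      (fun cut => if PySem.Str.len seq = L2 then pvHB kS cut seq else none) := by
  by_cases h3 : phase - c < 0
  · simp only [if_pos h3]
    split_ifs <;> rfl
  · simp only [if_neg h3]
    change _ = if PySem.Str.len seq = L2 then pvHB kS (phase - c) seq else none
    unfold pvHB
    generalize PySem.Str.len seq = L
    split_ifs <;> first | rfl | (exfalso; omega)

-- A's and B's per-pair contributions agree whenever min_phase is a lower bound of the SSR's phase
theorem pv_pointwise (kmerSize mp : Int) (fp : Option Int) (ssr : Int × Int × Int) (seq : String)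
    (hmin : mp ≤ ssr.2.2) :
    pvFA kmerSize mp fp seq ssr = pvGB kmerSize mp fp ssr seq := by
  cases fp with
  | some c => exact pv_core kmerSize c ssr.2.1 ssr.2.2 seq
  | none =>
    have hdiv : 3 * PySem.Int.floordiv (ssr.2.2 - mp) 3 ≤ ssr.2.2 - mp
        ∧ ssr.2.2 - mp < 3 * PySem.Int.floordiv (ssr.2.2 - mp) 3 + 3 := by
      rw [PySem.Int.floordiv_eq_ediv_of_pos (by norm_num : (0:Int) < 3)]
      constructor <;> omega
    have hchosen :
        (if mp ≤ ssr.2.2 ∧ ssr.2.2 < mp + 3 then some mp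
         else if mp + 3 ≤ ssr.2.2 ∧ ssr.2.2 < mp + 3 + 3 then some (mp + 3)
         else if ssr.2.2 ≥ mp + 3 + 3 then some (mp + 3 + 3)
         else none)
        = some (mp + 3 * min (PySem.Int.floordiv (ssr.2.2 - mp) 3) 2) := by
      split_ifs with h1 h2 h3
      · congr 1; omega
      · congr 1; omega
      · congr 1; omega
      · exact ((by omega : False)).elim
    have h1 : pvFA kmerSize mp none seq ssr
        = (if PySem.Str.len seq < kmerSize then none
           else if ssr.2.1 ≠ PySem.Str.len seq then none
           else match (if mp ≤ ssr.2.2 ∧ ssr.2.2 < mp + 3 then some mp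
                 else if mp + 3 ≤ ssr.2.2 ∧ ssr.2.2 < mp + 3 + 3 then some (mp + 3)
                 else if ssr.2.2 ≥ mp + 3 + 3 then some (mp + 3 + 3)
                 else none) with
             | none => none
             | some c =>
               if ssr.2.2 - c < 0 then none
               else if ssr.2.2 - c + kmerSize > PySem.Str.len seq then none
               else some (PySem.Str.slice seq (some (ssr.2.2 - c)) (some (ssr.2.2 - c + kmerSize)))) := rfl
    rw [h1, hchosen]
    exact pv_core kmerSize (mp + 3 * min (PySem.Int.floordiv (ssr.2.2 - mp) 3) 2) ssr.2.1 ssr.2.2 seq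

-- A's inner-loop body is the counter step at the pvFA-shaped option
theorem pv_bodyA (kS : Int) (chosen? : Option Int) (s : String) (r : Int × Int × Int)
    (d : PySem.Dict String Int) (hsmall : ¬ PySem.Str.len s < kS) :
    (if r.2.1 ≠ PySem.Str.len s then d
     else match chosen? with
       | none => d
       | some c =>
         if r.2.2 - c < 0 then d
         else if r.2.2 - c + kS > PySem.Str.len s then d
         else d.modify (PySem.Str.slice s (some (r.2.2 - c)) (some (r.2.2 - c + kS))) 0 (· + 1))
  = (match (if PySem.Str.len s < kS then none
      else if r.2.1 ≠ PySem.Str.len s then none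
      else match chosen? with
        | none => none
        | some c =>
          if r.2.2 - c < 0 then none
          else if r.2.2 - c + kS > PySem.Str.len s then none
          else some (PySem.Str.slice s (some (r.2.2 - c)) (some (r.2.2 - c + kS)))) with
    | some k => pvStep d k
    | none => d) := by
  rw [if_neg hsmall]
  cases chosen? with
  | none => split_ifs <;> rfl
  | some c =>
    by_cases h3 : r.2.2 - c < 0
    · simp only [if_pos h3]
      split_ifs <;> rfl
    · simp only [if_neg h3]
      by_cases h4 : r.2.2 - c + kS > PySem.Str.len s
      · simp only [if_pos h4]
        split_ifs <;> rfl
      · simp only [if_neg h4]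
        split_ifs <;> rfl

-- B's per-SSR body over the length bucket is the counter fold of its per-read options
theorem pv_bodyB (kS cval : Int) (seqs : List String) (r : Int × Int × Int)
    (d : PySem.Dict String Int) :
    (if r.2.2 - cval < 0 then d
     else (seqs.filter (fun s => PySem.Str.len s == r.2.1)).foldl
        (fun d seq => if r.2.2 - cval + kS ≤ PySem.Str.len seq then
            d.modify (PySem.Str.slice seq (some (r.2.2 - cval)) (some (r.2.2 - cval + kS))) 0 (· + 1)
          else d) d)
  = (seqs.filterMap (fun s =>
      (if r.2.2 - cval < 0 then none else some (r.2.2 - cval)).bind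
        (fun cut => if PySem.Str.len s = r.2.1 then pvHB kS cut s else none))).foldl pvStep d := by
  by_cases hcut : r.2.2 - cval < 0
  · simp only [if_pos hcut]
    have hnil : (seqs.filterMap (fun s =>
        (none : Option Int).bind (fun cut => if PySem.Str.len s = r.2.1 then pvHB kS cut s else none))) = [] := by
      rw [List.filterMap_eq_nil_iff]
      intro s _
      rfl
    rw [hnil]
    rfl
  · simp only [if_neg hcut]
    have hinner : (seqs.filterMap (fun s =>
        (some (r.2.2 - cval)).bind (fun cut => if PySem.Str.len s = r.2.1 then pvHB kS cut s else none)))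
        = (seqs.filter (fun s => PySem.Str.len s == r.2.1)).filterMap (pvHB kS (r.2.2 - cval)) := by
      rw [List.filterMap_filter]
      apply List.filterMap_congr
      intro s _
      simp
    rw [hinner]
    exact pv_foldl_opt _ (pvHB kS (r.2.2 - cval))
      (fun d s => by
        unfold pvHB
        by_cases hfit : r.2.2 - cval + kS ≤ PySem.Str.len s
        · simp only [if_pos hfit]
          rfl
        · simp only [if_neg hfit]) _ d

-- ===== VERDICT (by name: the statement is the Claim_ definition above) =====
theorem phasedKmerCounting_spec : Claim_equal_phasedKmerCounting := by
  intro sequences kmerSize sublistSSR forced_phase _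
  unfold Spec_phasedKmerCounting
  by_cases hnil : sublistSSR = []
  · subst hnil
    simp [phasedKmerCounting, phasedKmerCounting_alt]
  · obtain ⟨mp, hmp⟩ : ∃ m, PySem.List.min? (sublistSSR.map (fun sub => sub.2.2)) (fun x => x) = some m := by
      cases e : PySem.List.min? (sublistSSR.map (fun sub => sub.2.2)) (fun x => x) with
      | none =>
        exact absurd (by simpa using (PySem.List.min?_eq_none_iff _ _).mp e) hnil
      | some m => exact ⟨m, rfl⟩
    have hmin : ∀ r ∈ sublistSSR, mp ≤ r.2.2 := by
      intro r hr
      exact PySem.List.min?_isMin hmp _ (List.mem_map_of_mem hr)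
    -- A's result as the sorted counter of its k-mer stream
    have hA : phasedKmerCounting sequences kmerSize sublistSSR forced_phase
        = PySem.List.sorted2
            (PySem.Dict.counter
              (sequences.flatMap (fun s => sublistSSR.filterMap (pvFA kmerSize mp forced_phase s)))).items
            Prod.fst Prod.snd := by
      simp only [phasedKmerCounting, if_neg hnil, hmp, Option.getD_some]
      congr 2
      rw [PySem.Dict.counter_eq_foldl, List.foldl_flatMap]
      apply PySem.List.foldl_congr_mem
      intro d s _
      by_cases hsmall : PySem.Str.len s < kmerSize
      · have : sublistSSR.filterMap (pvFA kmerSize mp forced_phase s) = [] := by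
          rw [List.filterMap_eq_nil_iff]
          intro r _
          unfold pvFA
          rw [if_pos hsmall]
        rw [if_pos hsmall, this]
        rfl
      · rw [if_neg hsmall]
        apply pv_foldl_opt
        intro d r
        unfold pvFA
        exact pv_bodyA kmerSize _ s r d hsmall
    -- B's result as the sorted counter of its k-mer stream
    have hbucket : ∀ L : Int,
        (sequences.foldl (fun d seq => d.modify (PySem.Str.len seq) [] (· ++ [seq])) PySem.Dict.empty).getD L []
          = sequences.filter (fun s => PySem.Str.len s == L) := by
      intro L
      have hmapped : sequences.foldl (fun d seq => d.modify (PySem.Str.len seq) [] (· ++ [seq])) PySem.Dict.empty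
          = (sequences.map (fun s => (PySem.Str.len s, s))).foldl
              (fun d p => d.modify p.1 [] (· ++ [p.2])) PySem.Dict.empty := by
        rw [List.foldl_map]
      rw [hmapped, PySem.Dict.getD_foldl_modify_append, PySem.Dict.getD_empty, List.filter_map,
        List.map_map]
      simp [Function.comp_def]
    have hB : phasedKmerCounting_alt sequences kmerSize sublistSSR forced_phase
        = PySem.List.sorted2
            (PySem.Dict.counter
              (sublistSSR.flatMap (fun r => sequences.filterMap (fun s => pvGB kmerSize mp forced_phase r s)))).items
            Prod.fst Prod.snd := by
      simp only [phasedKmerCounting_alt, if_neg hnil, hmp, Option.getD_some]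
      congr 2
      rw [PySem.Dict.counter_eq_foldl, List.foldl_flatMap]
      apply PySem.List.foldl_congr_mem
      intro d r _
      cases hfp : forced_phase with
      | none =>
        rw [hbucket r.2.1]
        exact pv_bodyB kmerSize (mp + 3 * min (PySem.Int.floordiv (r.2.2 - mp) 3) 2) sequences r d
      | some c =>
        rw [hbucket r.2.1]
        exact pv_bodyB kmerSize c sequences r d
    rw [hA, hB]
    apply pv_counter_sorted
    have e1 : sequences.flatMap (fun s => sublistSSR.filterMap (pvFA kmerSize mp forced_phase s))
        = sequences.flatMap (fun s => sublistSSR.flatMap (fun r => (pvGB kmerSize mp forced_phase r s).toList)) := by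
      apply List.flatMap_congr
      intro s _
      rw [List.filterMap_congr (fun r hr => pv_pointwise kmerSize mp forced_phase r s (hmin r hr))]
      exact List.filterMap_eq_flatMap_toList _ _
    have e2 : sublistSSR.flatMap (fun r => sequences.filterMap (fun s => pvGB kmerSize mp forced_phase r s))
        = sublistSSR.flatMap (fun r => sequences.flatMap (fun s => (pvGB kmerSize mp forced_phase r s).toList)) := by
      apply List.flatMap_congr
      intro r _
      exact List.filterMap_eq_flatMap_toList _ _
    rw [e1, e2, ← Multiset.coe_eq_coe]
    simp only [← Multiset.coe_bind]
    exact Multiset.bind_bind _ _
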